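-- pv_equiv track=rewrite | github.com/RIPRODUCTIONS/V1_Build | backend/app/collectors/osint_collectors.py | _categorize_attacks
-- ===== SOURCE A (Python) =====
-- from typing import Any, Dict, List, Optional
--
-- def _categorize_attacks(ttps: List[str]) -> List[str]:
--     """Categorize attacks based on TTPs."""
--     categories = []
--
--     for ttp in ttps:
--         if "malware" in ttp:
--             categories.append("malware_attacks")
--         elif "attack" in ttp:
--             categories.append("targeted_attacks")
--
--     return list(set(categories))
-- ===== SOURCE B (Python) =====
-- def _categorize_attacks(ttps):
--     """Categorize attacks based on TTPs.
--
--     Two category-keyed scans (first matching index per category) and a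
--     constant-time assembly, instead of building a per-element category list
--     and deduplicating it with set(). Categories are listed in order of
--     first appearance (the original's list(set(...)) order is hash order,
--     so only the set of categories is specified).
--     """
--     im = next((i for i, t in enumerate(ttps) if "malware" in t), None)
--     it = next((i for i, t in enumerate(ttps) if "attack" in t and "malware" not in t), None)
--     if im is None:
--         return ["targeted_attacks"] if it is not None else []
--     if it is None:
--         return ["malware_attacks"]
--     if im < it:
--         return ["malware_attacks", "targeted_attacks"]
--     return ["targeted_attacks", "malware_attacks"]
-- ===== Notes on version B (the rewrite author's own statement) =====
-- stated objective: alternative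
-- what changed: Replaces the per-element append-then-set() dedupe pass with two category-keyed scans that find each category's first matching index and assemble the (at most two) categories directly, with no intermediate list or set.
import Mathlib
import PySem

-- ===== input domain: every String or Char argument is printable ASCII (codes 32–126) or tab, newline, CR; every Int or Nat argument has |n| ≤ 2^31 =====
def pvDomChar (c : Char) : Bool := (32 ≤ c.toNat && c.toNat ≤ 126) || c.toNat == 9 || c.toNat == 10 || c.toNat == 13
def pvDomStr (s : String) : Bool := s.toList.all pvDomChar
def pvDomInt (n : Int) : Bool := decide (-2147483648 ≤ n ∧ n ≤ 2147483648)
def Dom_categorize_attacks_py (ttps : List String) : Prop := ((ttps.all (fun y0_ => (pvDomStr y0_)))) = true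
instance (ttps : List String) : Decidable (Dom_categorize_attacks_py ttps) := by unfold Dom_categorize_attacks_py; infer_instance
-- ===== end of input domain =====

-- B replaces the append-then-set() pass with two first-match-index scans; equal cost.
-- A's Python returns list(set(...)) whose ORDER is hash order (outputs are compared as
-- sets); the ports use first-appearance order for that set.

-- ===== PORT A =====
def categorize_attacks_py (ttps : List String) : List String :=
  let categories := ttps.foldl (fun acc ttp =>
    if PySem.Str.isIn "malware" ttp then acc ++ ["malware_attacks"]
    else if PySem.Str.isIn "attack" ttp then acc ++ ["targeted_attacks"]
    else acc) []
  PySem.Set.ofList categories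

-- ===== PORT B =====
-- first index i with "malware" in ttps[i]  (B's first next(...) scan)
def pvFirstMal : List String → Option Nat
  | [] => none
  | t :: r => if PySem.Str.isIn "malware" t then some 0 else (pvFirstMal r).map (· + 1)

-- first index i with "attack" in ttps[i] and "malware" not in ttps[i]  (B's second scan)
def pvFirstTgt : List String → Option Nat
  | [] => none
  | t :: r => if PySem.Str.isIn "attack" t && !PySem.Str.isIn "malware" t then some 0
              else (pvFirstTgt r).map (· + 1)

def categorize_attacks_py_alt (ttps : List String) : List String :=
  match pvFirstMal ttps, pvFirstTgt ttps with
  | none, none => []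
  | none, some _ => ["targeted_attacks"]
  | some _, none => ["malware_attacks"]
  | some im, some it =>
      if im < it then ["malware_attacks", "targeted_attacks"]
      else ["targeted_attacks", "malware_attacks"]

-- ===== PRECONDITION & SPEC =====
def Spec_categorize_attacks_py (ttps : List String) (out : List String) : Prop := out = categorize_attacks_py_alt ttps
instance (ttps : List String) (out : List String) : Decidable (Spec_categorize_attacks_py ttps out) := by unfold Spec_categorize_attacks_py; infer_instance

-- ===== CLAIM (what is proved, stated in full; the proofs are below) =====
def Claim_equal_categorize_attacks_py : Prop := ∀ (ttps : List String), Dom_categorize_attacks_py ttps → Spec_categorize_attacks_py ttps (categorize_attacks_py ttps)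

-- ===== LEMMAS AND PROOFS =====

def pvCat (t : String) : Option String :=
  if PySem.Str.isIn "malware" t then some "malware_attacks"
  else if PySem.Str.isIn "attack" t then some "targeted_attacks"
  else none

theorem pvCats_eq (ttps : List String) (acc : List String) :
    ttps.foldl (fun acc ttp =>
      if PySem.Str.isIn "malware" ttp then acc ++ ["malware_attacks"]
      else if PySem.Str.isIn "attack" ttp then acc ++ ["targeted_attacks"]
      else acc) acc = acc ++ ttps.filterMap pvCat := by
  induction ttps generalizing acc with
  | nil => simp
  | cons t r ih =>
      rw [List.foldl_cons, ih, List.filterMap_cons]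
      unfold pvCat
      split_ifs <;> simp

theorem filterMap_pvCat_cons (t : String) (r : List String) :
    List.filterMap pvCat (t :: r) =
      (if PySem.Chars.isIn "malware".toList t.toList then ["malware_attacks"]
       else if PySem.Chars.isIn "attack".toList t.toList then ["targeted_attacks"]
       else []) ++ List.filterMap pvCat r := by
  rw [List.filterMap_cons]
  unfold pvCat
  split_ifs with h1 h2 <;> simp_all

theorem pvMain (ttps : List String) :
    PySem.Set.ofList (ttps.filterMap pvCat) = categorize_attacks_py_alt ttps := by
  induction ttps with
  | nil => rfl
  | cons t r ih =>
      by_cases hm : PySem.Str.isIn "malware" t = true <;>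
      by_cases ha : PySem.Str.isIn "attack" t = true <;>
      simp at hm ha <;>
      rcases em1 : pvFirstMal r with _ | i <;> rcases em2 : pvFirstTgt r with _ | j <;>
      simp only [categorize_attacks_py_alt, em1, em2] at ih <;>
      simp [filterMap_pvCat_cons, pvFirstMal, pvFirstTgt, categorize_attacks_py_alt,
            hm, ha, em1, em2, PySem.Set.ofList_cons, PySem.Set.discard, ih] <;>
      (try split_ifs) <;>
      (try simp_all)

-- ===== VERDICT (by name: the statement is the Claim_ definition above) =====
theorem categorize_attacks_py_spec : Claim_equal_categorize_attacks_py := by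
  intro ttps _
  show categorize_attacks_py ttps = categorize_attacks_py_alt ttps
  rw [categorize_attacks_py, pvCats_eq, List.nil_append, pvMain]
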